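-- pv_equiv track=rewrite | github.com/MagicRodri/Algo | usatu/script.py | solve
-- ===== SOURCE A (Python) =====
-- def solve(a,b,stops = None):
--
-- 	if stops is not None:
--
-- 		if a not in stops or b not in stops:
-- 			return 'NO'
-- 		else:
-- 			i = []
-- 			j = []
-- 			for index,val in enumerate(stops):
-- 				if val == a:
-- 					i.append(index)
-- 				if val == b:
-- 					j.append(index)
--
-- 			i.sort()
-- 			j.sort()
-- 			if i[0] < j[-1] :
-- 				return'YES'
-- 			return 'NO'
-- ===== SOURCE B (Python) =====
-- def solve(a, b, stops=None):
--     if stops is None: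
--         return None
--     # One-pass state machine: YES iff some occurrence of a is strictly
--     # followed (anywhere later) by an occurrence of b; this subsumes the
--     # membership guards and the first/last-index comparison of A.
--     seen_a = False
--     for s in stops:
--         if seen_a and s == b:
--             return 'YES'
--         if s == a:
--             seen_a = True
--     return 'NO'
-- ===== Notes on version B (the rewrite author's own statement) =====
-- stated objective: alternative
-- what changed: B replaces A's index-list construction (collect all indices of a and b, sort both, compare first-of-a with last-of-b) by a one-pass boolean state machine with early exit: scan once, remember whether a has been seen, and answer YES at the first b that follows an a; the membership guards disappear because a missing stop can never fire the state machine.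
-- outside the precondition, e.g. on solve(1, 2, None): A returns None, B returns None
import Mathlib
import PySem

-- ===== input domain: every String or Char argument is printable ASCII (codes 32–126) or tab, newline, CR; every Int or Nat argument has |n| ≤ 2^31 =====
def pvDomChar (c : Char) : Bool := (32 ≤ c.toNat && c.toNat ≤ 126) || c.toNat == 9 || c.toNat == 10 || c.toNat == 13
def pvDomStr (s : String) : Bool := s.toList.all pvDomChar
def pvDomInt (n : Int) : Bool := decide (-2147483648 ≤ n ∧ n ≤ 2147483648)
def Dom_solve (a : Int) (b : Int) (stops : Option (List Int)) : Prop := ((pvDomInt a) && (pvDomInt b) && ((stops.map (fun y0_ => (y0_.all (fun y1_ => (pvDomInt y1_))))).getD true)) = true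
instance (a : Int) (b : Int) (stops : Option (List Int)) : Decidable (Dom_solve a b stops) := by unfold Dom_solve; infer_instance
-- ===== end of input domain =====

-- B replaces A's two sorted index lists by a one-pass seen-a state machine with early exit
-- (YES iff some b occurs strictly after some a); objective: alternative. On stops=None the
-- Python A returns None (not a str), which Pre_solve excludes; Source B behaves identically there.


-- ===== PORT A =====
def solve (a : Int) (b : Int) (stops : Option (List Int)) : String :=
  match stops with
  | none => ""   -- Python A returns None here (no str value); excluded by Pre_solve
  | some l =>
    if a ∉ l ∨ b ∉ l then "NO"
    else
      -- for index,val in enumerate(stops): collect indices of a into i, of b into j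
      let p := (l.zipIdx).foldl
        (fun (s : List Int × List Int) (e : Int × Nat) =>
          (if e.1 = a then s.1 ++ [(e.2 : Int)] else s.1,
           if e.1 = b then s.2 ++ [(e.2 : Int)] else s.2)) ([], [])
      let i := PySem.List.sorted p.1 (fun x => x)
      let j := PySem.List.sorted p.2 (fun x => x)
      match PySem.List.pyGet? i 0, PySem.List.pyGet? j (-1) with
      | some x, some y => if x < y then "YES" else "NO"
      | _, _ => "NO"   -- unreachable: a ∈ l and b ∈ l make i and j nonempty

-- ===== PORT B =====
-- the for-loop of Source B with its early return: state = seen_a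
def solveAltLoop (a b : Int) : List Int → Bool → String
  | [], _ => "NO"
  | s :: t, seen => if seen = true ∧ s = b then "YES" else solveAltLoop a b t (seen || decide (s = a))

def solve_alt (a : Int) (b : Int) (stops : Option (List Int)) : String :=
  match stops with
  | none => ""   -- Python Source B returns None here; excluded by Pre_solve
  | some l => solveAltLoop a b l false

-- ===== PRECONDITION & SPEC =====
-- Pre_ excludes stops = None, where Python A returns None, not a value of type str.
def Pre_solve (a : Int) (b : Int) (stops : Option (List Int)) : Prop := stops.isSome = true
instance (a : Int) (b : Int) (stops : Option (List Int)) : Decidable (Pre_solve a b stops) := by unfold Pre_solve; infer_instance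
def pvWitness_solve : Int × Int × Option (List Int) := (1, 2, some [1, 2])
def Spec_solve (a : Int) (b : Int) (stops : Option (List Int)) (out : String) : Prop := out = solve_alt a b stops
instance (a : Int) (b : Int) (stops : Option (List Int)) (out : String) : Decidable (Spec_solve a b stops out) := by unfold Spec_solve; infer_instance

-- ===== CLAIM (what is proved, stated in full; the proofs are below) =====
def Claim_equal_solve : Prop := ∀ (a : Int) (b : Int) (stops : Option (List Int)), Dom_solve a b stops → Pre_solve a b stops → Spec_solve a b stops (solve a b stops)

-- ===== LEMMAS AND PROOFS =====

-- "some occurrence of a is strictly followed by an occurrence of b"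
def pairEx (a b : Int) : List Int → Bool
  | [] => false
  | s :: t => (decide (s = a) && t.contains b) || pairEx a b t

theorem loop_eq (a b : Int) (l : List Int) (seen : Bool) :
    solveAltLoop a b l seen = if (seen && l.contains b) || pairEx a b l then "YES" else "NO" := by
  induction l generalizing seen with
  | nil => simp [solveAltLoop, pairEx]
  | cons s t ih =>
      cases seen with
      | false =>
          rw [solveAltLoop, ih]
          simp [pairEx]
      | true =>
          rw [solveAltLoop, ih]
          by_cases hsb : s = b
          · simp [pairEx, hsb, List.contains_cons]
          · by_cases hc : b ∈ t <;>
              simp [pairEx, hsb, hc, Ne.symm hsb, List.contains_iff_mem]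

theorem pairEx_iff (a b : Int) (l : List Int) :
    pairEx a b l = true ↔ ∃ i j : Nat, i < j ∧ l[i]? = some a ∧ l[j]? = some b := by
  induction l with
  | nil => simp [pairEx]
  | cons s t ih =>
      simp only [pairEx, Bool.or_eq_true, Bool.and_eq_true, decide_eq_true_eq,
        List.contains_iff_mem, ih]
      constructor
      · rintro (⟨rfl, hb⟩ | ⟨i, j, hij, hi, hj⟩)
        · obtain ⟨j, hj⟩ := List.mem_iff_getElem?.1 hb
          exact ⟨0, j + 1, Nat.succ_pos _, rfl, by simpa using hj⟩
        · exact ⟨i + 1, j + 1, by omega, by simpa using hi, by simpa using hj⟩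
      · rintro ⟨i, j, hij, hi, hj⟩
        cases i with
        | zero =>
            left
            cases j with
            | zero => omega
            | succ j =>
                simp only [List.getElem?_cons_zero, Option.some.injEq] at hi
                exact ⟨hi, List.mem_iff_getElem?.2 ⟨j, by simpa using hj⟩⟩
        | succ i =>
            cases j with
            | zero => omega
            | succ j =>
                exact Or.inr ⟨i, j, by omega, by simpa using hi, by simpa using hj⟩

-- the list of indices (as Ints) at which v occurs in l, when enumeration starts at k
def pvIdxs (v : Int) (l : List Int) (k : Nat) : List Int :=
  ((l.zipIdx k).filter (fun e => decide (e.1 = v))).map (fun e => ((e.2 : Nat) : Int))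

theorem pvIdxs_cons (v x : Int) (l : List Int) (k : Nat) :
    pvIdxs v (x :: l) k = (if x = v then [(k : Int)] else []) ++ pvIdxs v l (k + 1) := by
  by_cases h : x = v <;> simp [pvIdxs, List.zipIdx_cons, List.filter_cons, h]

theorem mem_pvIdxs (v : Int) (l : List Int) (k : Nat) (m : Int) :
    m ∈ pvIdxs v l k ↔ ∃ i : Nat, l[i]? = some v ∧ m = ((k + i : Nat) : Int) := by
  induction l generalizing k with
  | nil => simp [pvIdxs]
  | cons x t ih =>
      rw [pvIdxs_cons]
      simp only [List.mem_append, ih]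
      constructor
      · rintro (h | ⟨i, hi, rfl⟩)
        · split_ifs at h with hx
          · simp only [List.mem_singleton] at h
            exact ⟨0, by simp [hx], by simp [h]⟩
          · simp at h
        · exact ⟨i + 1, by simpa using hi, by congr 1; omega⟩
      · rintro ⟨i, hi, rfl⟩
        cases i with
        | zero =>
            simp only [List.getElem?_cons_zero, Option.some.injEq] at hi
            left; simp [hi]
        | succ i =>
            right
            exact ⟨i, by simpa using hi, by congr 1; omega⟩

theorem pvIdxs_lower_bound (v : Int) (l : List Int) (k : Nat) :
    ∀ m ∈ pvIdxs v l k, (k : Int) ≤ m := by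
  intro m hm
  obtain ⟨i, -, rfl⟩ := (mem_pvIdxs v l k m).1 hm
  omega

theorem pvIdxs_pairwise (v : Int) (l : List Int) (k : Nat) :
    List.Pairwise (· < ·) (pvIdxs v l k) := by
  induction l generalizing k with
  | nil => simp [pvIdxs]
  | cons x t ih =>
      rw [pvIdxs_cons]
      refine List.pairwise_append.2 ⟨?_, ih (k + 1), ?_⟩
      · split_ifs <;> simp
      · intro m hm n hn
        have hk : ((k : Int)) = m ∨ m ∈ ([] : List Int) := by
          split_ifs at hm with hx <;> simp at hm <;> simp [hm]
        have := pvIdxs_lower_bound v t (k + 1) n hn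
        rcases hk with h | h
        · omega
        · simp at h

theorem pvIdxs_sorted_self (v : Int) (l : List Int) (k : Nat) :
    PySem.List.sorted (pvIdxs v l k) (fun x => x) = pvIdxs v l k :=
  PySem.List.sorted_eq_of_perm_of_pairwise_lt _ _ _ (List.Perm.refl _) (pvIdxs_pairwise v l k)

theorem head?_min {l : List Int} (h : List.Pairwise (· < ·) l) {x : Int}
    (hx : l.head? = some x) {m : Int} (hm : m ∈ l) : x ≤ m := by
  cases l with
  | nil => simp at hx
  | cons y t =>
      simp only [List.head?_cons, Option.some.injEq] at hx
      subst hx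
      rcases List.mem_cons.1 hm with rfl | hm
      · exact le_refl m
      · exact le_of_lt (List.rel_of_pairwise_cons h hm)

theorem getLast?_max {l : List Int} (h : List.Pairwise (· < ·) l) {x : Int}
    (hx : l.getLast? = some x) {m : Int} (hm : m ∈ l) : m ≤ x := by
  have hrev : List.Pairwise (fun u v : Int => v < u) l.reverse := List.pairwise_reverse.2 h
  have hx' : l.reverse.head? = some x := by rwa [List.head?_reverse]
  have hm' : m ∈ l.reverse := List.mem_reverse.2 hm
  cases hl : l.reverse with
  | nil => rw [hl] at hx'; simp at hx'
  | cons y t =>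
      rw [hl] at hx' hm' hrev
      simp only [List.head?_cons, Option.some.injEq] at hx'
      subst hx'
      rcases List.mem_cons.1 hm' with rfl | hm''
      · exact le_refl m
      · exact le_of_lt (List.rel_of_pairwise_cons hrev hm'')

theorem mem_of_head? {l : List Int} {x : Int} (h : l.head? = some x) : x ∈ l := by
  cases l with
  | nil => simp at h
  | cons y t => simp only [List.head?_cons, Option.some.injEq] at h; simp [h]

theorem mem_of_getLast? {l : List Int} {x : Int} (h : l.getLast? = some x) : x ∈ l := by
  have : x ∈ l.reverse := mem_of_head? (by rwa [List.head?_reverse])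
  exact List.mem_reverse.1 this

-- ===== VERDICT (by name: the statement is the Claim_ definition above) =====
theorem solve_spec : Claim_equal_solve := by
  intro a b stops _ hpre
  cases stops with
  | none => exact absurd hpre (by simp [Pre_solve])
  | some l =>
    show solve a b (some l) = solve_alt a b (some l)
    rw [solve, solve_alt, loop_eq]
    simp only [Bool.false_and, Bool.false_or]
    by_cases ha : a ∈ l
    · by_cases hb : b ∈ l
      · rw [if_neg (by simp [ha, hb])]
        rw [PySem.List.foldl_prod_mk
              (f := fun s (e : Int × Nat) => if e.1 = a then s ++ [((e.2 : Nat) : Int)] else s)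
              (g := fun s (e : Int × Nat) => if e.1 = b then s ++ [((e.2 : Nat) : Int)] else s)]
        simp only [PySem.List.foldl_append_ite (fun (e : Int × Nat) => e.1 = a)
            (fun e => ((e.2 : Nat) : Int)) l.zipIdx [],
          PySem.List.foldl_append_ite (fun (e : Int × Nat) => e.1 = b)
            (fun e => ((e.2 : Nat) : Int)) l.zipIdx [], List.nil_append]
        have hia := pvIdxs_sorted_self a l 0
        have hjb := pvIdxs_sorted_self b l 0
        simp only [pvIdxs] at hia hjb
        rw [hia, hjb, PySem.List.pyGet?_zero, PySem.List.pyGet?_neg_one,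
          ← List.head?_eq_getElem?]
        have hiaNE : (pvIdxs a l 0).head?.isSome = true := by
          obtain ⟨i, hi⟩ := List.mem_iff_getElem?.1 ha
          have : ((0 + i : Nat) : Int) ∈ pvIdxs a l 0 := (mem_pvIdxs a l 0 _).2 ⟨i, hi, rfl⟩
          cases hh : (pvIdxs a l 0).head? with
          | some _ => rfl
          | none =>
              rw [List.head?_eq_none_iff] at hh
              rw [hh] at this; simp at this
        have hjbNE : (pvIdxs b l 0).getLast?.isSome = true := by
          obtain ⟨j, hj⟩ := List.mem_iff_getElem?.1 hb
          have : ((0 + j : Nat) : Int) ∈ pvIdxs b l 0 := (mem_pvIdxs b l 0 _).2 ⟨j, hj, rfl⟩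
          cases hh : (pvIdxs b l 0).getLast? with
          | some _ => rfl
          | none =>
              rw [List.getLast?_eq_none_iff] at hh
              rw [hh] at this; simp at this
        obtain ⟨x, hx⟩ := Option.isSome_iff_exists.1 hiaNE
        obtain ⟨y, hy⟩ := Option.isSome_iff_exists.1 hjbNE
        simp only [pvIdxs] at hx hy
        rw [hx, hy]
        show (if x < y then "YES" else "NO") = if pairEx a b l = true then "YES" else "NO"
        have key : x < y ↔ pairEx a b l = true := by
          constructor
          · intro hxy
            have hxmem : x ∈ pvIdxs a l 0 := mem_of_head? (by simpa [pvIdxs] using hx)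
            have hymem : y ∈ pvIdxs b l 0 := mem_of_getLast? (by simpa [pvIdxs] using hy)
            obtain ⟨i, hi, rfl⟩ := (mem_pvIdxs a l 0 x).1 hxmem
            obtain ⟨j, hj, rfl⟩ := (mem_pvIdxs b l 0 y).1 hymem
            exact (pairEx_iff a b l).2 ⟨i, j, by omega, hi, hj⟩
          · intro hpe
            obtain ⟨i, j, hij, hi, hj⟩ := (pairEx_iff a b l).1 hpe
            have hm : ((0 + i : Nat) : Int) ∈ pvIdxs a l 0 := (mem_pvIdxs a l 0 _).2 ⟨i, hi, rfl⟩
            have hn : ((0 + j : Nat) : Int) ∈ pvIdxs b l 0 := (mem_pvIdxs b l 0 _).2 ⟨j, hj, rfl⟩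
            have h1 : x ≤ ((0 + i : Nat) : Int) :=
              head?_min (pvIdxs_pairwise a l 0) (by simpa [pvIdxs] using hx) hm
            have h2 : ((0 + j : Nat) : Int) ≤ y :=
              getLast?_max (pvIdxs_pairwise b l 0) (by simpa [pvIdxs] using hy) hn
            omega
        by_cases hxy : x < y
        · rw [if_pos hxy, if_pos (key.1 hxy)]
        · rw [if_neg hxy]
          cases hpe : pairEx a b l with
          | false => simp
          | true => exact absurd (key.2 hpe) hxy
      · rw [if_pos (Or.inr hb)]
        cases hpe : pairEx a b l with
        | false => simp
        | true =>
            obtain ⟨i, j, -, -, hj⟩ := (pairEx_iff a b l).1 hpe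
            exact absurd (List.mem_iff_getElem?.2 ⟨j, hj⟩) hb
    · rw [if_pos (Or.inl ha)]
      cases hpe : pairEx a b l with
      | false => simp
      | true =>
          obtain ⟨i, j, -, hi, -⟩ := (pairEx_iff a b l).1 hpe
          exact absurd (List.mem_iff_getElem?.2 ⟨i, hi⟩) ha
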